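-- pv_equiv track=rewrite | github.com/Pallet-io/Pallet-API | oss_server/base/utils.py | balance_from_utxos
-- ===== SOURCE A (Python) =====
-- def balance_from_utxos(utxos):
--     """Return balance of a list of utxo.
--
--     Args:
--         utxos: A list of utxo with following format.
--                    [{
--                        txid: ''
--                        color: 0,
--                        value: 0,
--                        vout: 0,
--                        scriptPubKey: '',
--                     }]
--
--     Returns: A balance dictionary with color as key and sum of value of that color as dictionary
--              value.
--     """
--     balance_dict = {}
--     if utxos:
--         for utxo in utxos:
--             color = utxo['color']
--             value = utxo['value']
--             balance_dict[color] = balance_dict.get(color, 0) + value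
--     return balance_dict
-- ===== SOURCE B (Python) =====
-- def balance_from_utxos(utxos):
--     # Two-pass: distinct colors in first-occurrence order, then sum per color.
--     colors = list(dict.fromkeys(u['color'] for u in utxos))
--     return {c: sum(u['value'] for u in utxos if u['color'] == c) for c in colors}
-- ===== Notes on version B (the rewrite author's own statement) =====
-- stated objective: alternative
-- what changed: B replaces A's single-pass dict accumulation with a two-pass scheme: first dedup the colors in first-occurrence order, then a comprehension summing each color's values by rescanning the list; Pre_ excludes utxos missing a 'color' or 'value' key, on which A raises KeyError.
import Mathlib
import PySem

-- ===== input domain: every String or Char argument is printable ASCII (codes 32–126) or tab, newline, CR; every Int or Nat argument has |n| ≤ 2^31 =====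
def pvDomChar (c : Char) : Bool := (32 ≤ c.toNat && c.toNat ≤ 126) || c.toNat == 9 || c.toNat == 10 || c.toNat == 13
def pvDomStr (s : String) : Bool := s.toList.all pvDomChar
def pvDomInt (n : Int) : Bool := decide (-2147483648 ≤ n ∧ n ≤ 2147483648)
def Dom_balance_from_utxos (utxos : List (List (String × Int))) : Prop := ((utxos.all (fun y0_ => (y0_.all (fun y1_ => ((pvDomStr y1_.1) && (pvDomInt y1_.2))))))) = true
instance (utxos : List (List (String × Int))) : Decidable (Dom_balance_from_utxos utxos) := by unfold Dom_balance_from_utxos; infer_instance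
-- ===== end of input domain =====

-- B sums per color after dedup (two passes) instead of A's running-dict accumulation; same result, same cost class.

-- u[k] for a utxo given as an association list (first match). Pre_ guarantees the key
-- exists; on a missing key Python raises KeyError, which Pre_ excludes, so the
-- `.getD 0` default is never reached on admitted inputs.
def pvGetI (u : List (String × Int)) (k : String) : Int :=
  ((u.find? (fun p => p.1 == k)).map (·.2)).getD 0

-- ===== PORT A =====
def balance_from_utxos (utxos : List (List (String × Int))) : List (Int × Int) :=
  let balance_dict : PySem.Dict Int Int := PySem.Dict.empty
  let balance_dict :=
    if !utxos.isEmpty then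
      utxos.foldl (fun bd utxo =>
        let color := pvGetI utxo "color"
        let value := pvGetI utxo "value"
        bd.insert color (bd.getD color 0 + value)) balance_dict
    else balance_dict
  balance_dict.items

-- ===== PORT B =====
def balance_from_utxos_alt (utxos : List (List (String × Int))) : List (Int × Int) :=
  let colors := PySem.Set.ofList (utxos.map (fun u => pvGetI u "color"))
  colors.map (fun c =>
    (c, (utxos.filter (fun u => pvGetI u "color" == c)).foldl
          (fun s u => s + pvGetI u "value") 0))

-- ===== PRECONDITION & SPEC =====
-- Pre_ excludes utxos that lack a 'color' or 'value' key: there Python A raises KeyError.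
def Pre_balance_from_utxos (utxos : List (List (String × Int))) : Prop :=
  (utxos.all (fun u => u.any (fun p => p.1 == "color") && u.any (fun p => p.1 == "value"))) = true
instance (utxos : List (List (String × Int))) : Decidable (Pre_balance_from_utxos utxos) := by unfold Pre_balance_from_utxos; infer_instance

def pvWitness_balance_from_utxos : (List (List (String × Int))) :=
  [[("color", 1), ("value", 7)], [("color", 0), ("value", 2)], [("color", 1), ("value", 3)]]

def Spec_balance_from_utxos (utxos : List (List (String × Int))) (out : List (Int × Int)) : Prop := out = balance_from_utxos_alt utxos
instance (utxos : List (List (String × Int))) (out : List (Int × Int)) : Decidable (Spec_balance_from_utxos utxos out) := by unfold Spec_balance_from_utxos; infer_instance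

-- ===== CLAIM (what is proved, stated in full; the proofs are below) =====
def Claim_equal_balance_from_utxos : Prop := ∀ (utxos : List (List (String × Int))), Dom_balance_from_utxos utxos → Pre_balance_from_utxos utxos → Spec_balance_from_utxos utxos (balance_from_utxos utxos)

-- ===== LEMMAS AND PROOFS =====

-- A's accumulated dict looks up to the sum of the values of matching color.
lemma getD_fold_insert (l : List (List (String × Int))) (d : PySem.Dict Int Int) (c : Int) :
    (l.foldl (fun bd utxo =>
        bd.insert (pvGetI utxo "color") (bd.getD (pvGetI utxo "color") 0 + pvGetI utxo "value")) d).getD c 0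
      = d.getD c 0 + ((l.filter (fun u => pvGetI u "color" == c)).map (fun u => pvGetI u "value")).sum := by
  induction l generalizing d with
  | nil => simp
  | cons u l ih =>
    simp only [List.foldl_cons, List.filter_cons]
    rw [ih]
    by_cases h : pvGetI u "color" = c
    · simp [h, PySem.Dict.getD_insert_self]; ring
    · simp [h, PySem.Dict.getD_insert, Ne.symm h]

theorem balance_from_utxos_spec : Claim_equal_balance_from_utxos := by
  intro utxos _ _
  show balance_from_utxos utxos = balance_from_utxos_alt utxos
  unfold balance_from_utxos balance_from_utxos_alt
  cases utxos with
  | nil => rfl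
  | cons u l =>
    simp only [List.isEmpty_cons, Bool.not_false, if_pos]
    set L := u :: l with hL
    have hnd : ((L.foldl (fun bd utxo =>
        bd.insert (pvGetI utxo "color") (bd.getD (pvGetI utxo "color") 0 + pvGetI utxo "value"))
        PySem.Dict.empty)).keys.Nodup :=
      PySem.Dict.nodup_keys_foldl_insert_key L (fun utxo => pvGetI utxo "color")
        (fun bd utxo => bd.getD (pvGetI utxo "color") 0 + pvGetI utxo "value")
        PySem.Dict.empty (by simp [PySem.Dict.keys_empty])
    rw [PySem.Dict.items_eq_map_keys _ hnd 0,
        PySem.Dict.keys_foldl_insert_key L (fun utxo => pvGetI utxo "color")]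
    simp only [PySem.Dict.keys_empty, PySem.Set.update_nil_left]
    apply List.map_congr_left
    intro c _
    rw [getD_fold_insert, PySem.List.foldl_add]
    simp [PySem.Dict.getD_empty]
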